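-- pv_equiv track=rewrite | github.com/Sum-Outman/Self | training/error_detection_performance.py | _guess_metric_type
-- ===== SOURCE A (Python) =====
-- def _guess_metric_type(metric_id: str) -> str:
--     """根据指标ID猜测指标类型"""
--     metric_id_lower = metric_id.lower()
--
--     if any(
--         word in metric_id_lower
--         for word in ["latency", "delay", "response_time", "rt"]
--     ):
--         return "latency"
--     elif any(
--         word in metric_id_lower
--         for word in ["throughput", "tps", "qps", "requests_per_second"]
--     ):
--         return "throughput"
--     elif any(
--         word in metric_id_lower
--         for word in ["accuracy", "precision", "recall", "f1"]
--     ):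
--         return "accuracy"
--     elif any(word in metric_id_lower for word in ["memory", "ram", "heap"]):
--         return "memory"
--     elif any(word in metric_id_lower for word in ["cpu", "processor", "load"]):
--         return "cpu"
--     else:
--         return "generic"
-- ===== SOURCE B (Python) =====
-- _KEYWORD_PRIORITY = {
--     "latency": 0, "delay": 0, "response_time": 0, "rt": 0,
--     "throughput": 1, "tps": 1, "qps": 1, "requests_per_second": 1,
--     "accuracy": 2, "precision": 2, "recall": 2, "f1": 2,
--     "memory": 3, "ram": 3, "heap": 3,
--     "cpu": 4, "processor": 4, "load": 4,
-- }
--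
-- _TYPES = ("latency", "throughput", "accuracy", "memory", "cpu", "generic")
--
--
-- def _guess_metric_type(metric_id: str) -> str:
--     """根据指标ID猜测指标类型"""
--     s = metric_id.lower()
--     best = len(_TYPES) - 1
--     for i in range(len(s)):
--         for keyword, priority in _KEYWORD_PRIORITY.items():
--             if priority < best and s.startswith(keyword, i):
--                 best = priority
--     return _TYPES[best]
-- ===== Notes on version B (the rewrite author's own statement) =====
-- stated objective: alternative
-- what changed: Replaced the five staged any-substring scans with a single left-to-right pass over the lowercased id that prefix-matches a keyword->priority dictionary at each position, keeps the minimal matched priority, and finally indexes a type table.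
import Mathlib
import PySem

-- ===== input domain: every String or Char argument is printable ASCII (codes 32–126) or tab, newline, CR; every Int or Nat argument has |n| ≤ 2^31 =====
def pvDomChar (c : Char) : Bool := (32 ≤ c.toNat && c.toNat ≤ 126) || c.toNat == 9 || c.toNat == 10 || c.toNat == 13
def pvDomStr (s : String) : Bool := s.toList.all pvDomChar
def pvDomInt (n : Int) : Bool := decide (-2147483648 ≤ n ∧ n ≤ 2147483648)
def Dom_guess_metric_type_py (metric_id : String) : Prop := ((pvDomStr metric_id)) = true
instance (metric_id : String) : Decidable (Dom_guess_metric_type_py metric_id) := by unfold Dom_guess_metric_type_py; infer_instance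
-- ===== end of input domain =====

-- B replaces A's five staged any-substring scans with ONE left-to-right pass over the
-- lowercased id: at each position it prefix-matches a keyword→priority dictionary and keeps
-- the minimal matched priority, finally indexing a type table (alternative algorithm).

-- ===== PORT A =====
def guess_metric_type_py (metric_id : String) : String :=
  let metric_id_lower := PySem.Str.lower metric_id
  if ["latency", "delay", "response_time", "rt"].any
      (fun word => PySem.Str.isIn word metric_id_lower) then "latency"
  else if ["throughput", "tps", "qps", "requests_per_second"].any
      (fun word => PySem.Str.isIn word metric_id_lower) then "throughput"
  else if ["accuracy", "precision", "recall", "f1"].any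
      (fun word => PySem.Str.isIn word metric_id_lower) then "accuracy"
  else if ["memory", "ram", "heap"].any
      (fun word => PySem.Str.isIn word metric_id_lower) then "memory"
  else if ["cpu", "processor", "load"].any
      (fun word => PySem.Str.isIn word metric_id_lower) then "cpu"
  else "generic"

-- ===== PORT B =====
-- _KEYWORD_PRIORITY (a dict iterated in insertion order = this association list)
def pvKw : List (String × Nat) :=
  [("latency", 0), ("delay", 0), ("response_time", 0), ("rt", 0),
   ("throughput", 1), ("tps", 1), ("qps", 1), ("requests_per_second", 1),
   ("accuracy", 2), ("precision", 2), ("recall", 2), ("f1", 2),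
   ("memory", 3), ("ram", 3), ("heap", 3),
   ("cpu", 4), ("processor", 4), ("load", 4)]

def pvTypes : List String := ["latency", "throughput", "accuracy", "memory", "cpu", "generic"]

-- body of the inner loop: 'if priority < best and s.startswith(keyword, i): best = priority'
-- (s.startswith(keyword, i) with 0 ≤ i < len(s) is exactly keyword.toList.isPrefixOf (drop i))
def pvStep (cs : List Char) (i : Nat) (b : Nat) (kp : String × Nat) : Nat :=
  if kp.2 < b ∧ kp.1.toList.isPrefixOf (cs.drop i) then kp.2 else b

def guess_metric_type_py_alt (metric_id : String) : String :=
  let s := PySem.Str.lower metric_id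
  let best := (List.range s.toList.length).foldl
      (fun b i => pvKw.foldl (pvStep s.toList i) b) (pvTypes.length - 1)
  -- _TYPES[best]: best ≤ 5 always (proved below), so the index is in range
  pvTypes.getD best ""

-- ===== PRECONDITION & SPEC =====
def Spec_guess_metric_type_py (metric_id : String) (out : String) : Prop := out = guess_metric_type_py_alt metric_id
instance (metric_id : String) (out : String) : Decidable (Spec_guess_metric_type_py metric_id out) := by unfold Spec_guess_metric_type_py; infer_instance

-- ===== CLAIM (what is proved, stated in full; the proofs are below) =====
def Claim_equal_guess_metric_type_py : Prop := ∀ (metric_id : String), Dom_guess_metric_type_py metric_id → Spec_guess_metric_type_py metric_id (guess_metric_type_py metric_id)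

-- ===== LEMMAS AND PROOFS =====

-- the value of B's loop, named for the proofs
def pvBest (s : String) : Nat :=
  (List.range s.toList.length).foldl (fun b i => pvKw.foldl (pvStep s.toList i) b) (pvTypes.length - 1)

-- A's five conditions, indexed by priority
def pvCondP (s : String) : Nat → Bool
  | 0 => ["latency", "delay", "response_time", "rt"].any (fun w => PySem.Str.isIn w s)
  | 1 => ["throughput", "tps", "qps", "requests_per_second"].any (fun w => PySem.Str.isIn w s)
  | 2 => ["accuracy", "precision", "recall", "f1"].any (fun w => PySem.Str.isIn w s)
  | 3 => ["memory", "ram", "heap"].any (fun w => PySem.Str.isIn w s)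
  | 4 => ["cpu", "processor", "load"].any (fun w => PySem.Str.isIn w s)
  | _ => false

lemma pv_isIn_of_hit (s w : String) (i : Nat)
    (h : w.toList.isPrefixOf (s.toList.drop i) = true) : PySem.Str.isIn w s = true := by
  have h' : w.toList <+: s.toList.drop i := List.isPrefixOf_iff_prefix.mp h
  have : PySem.Chars.isIn w.toList s.toList = true :=
    (PySem.Chars.exists_prefix_drop_iff_isIn _ _).mp ⟨i, h'⟩
  simpa [PySem.Str.isIn_eq] using this

lemma pv_hit_of_isIn (s w : String) (hw : w.toList ≠ [])
    (h : PySem.Str.isIn w s = true) :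
    ∃ i ∈ List.range s.toList.length, w.toList.isPrefixOf (s.toList.drop i) = true := by
  have h' : PySem.Chars.isIn w.toList s.toList = true := by simpa [PySem.Str.isIn_eq] using h
  obtain ⟨j, hj⟩ := (PySem.Chars.exists_prefix_drop_iff_isIn _ _).mpr h'
  refine ⟨j, ?_, List.isPrefixOf_iff_prefix.mpr hj⟩
  by_contra hge
  have : s.toList.length ≤ j := by simpa [List.mem_range] using hge
  rw [List.drop_eq_nil_of_le this] at hj
  exact hw (List.prefix_nil.mp hj)

lemma pv_inner (cs : List Char) (i : Nat) (K : List (String × Nat)) (b : Nat) :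
    (K.foldl (pvStep cs i) b = b ∨
      ∃ kp ∈ K, kp.2 = K.foldl (pvStep cs i) b ∧ kp.1.toList.isPrefixOf (cs.drop i) = true)
    ∧ (∀ kp ∈ K, kp.1.toList.isPrefixOf (cs.drop i) = true → K.foldl (pvStep cs i) b ≤ kp.2)
    ∧ K.foldl (pvStep cs i) b ≤ b := by
  induction K generalizing b with
  | nil => simp
  | cons kp K ih =>
    obtain ⟨ih1, ih2, ih3⟩ := ih (pvStep cs i b kp)
    simp only [List.foldl_cons]
    by_cases hm : kp.1.toList.isPrefixOf (cs.drop i) = true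
    · by_cases hl : kp.2 < b
      · have hb : pvStep cs i b kp = kp.2 := by simp [pvStep, hl, hm]
        refine ⟨?_, ?_, ?_⟩
        · rcases ih1 with h | ⟨kp', hkp', h1, h2⟩
          · exact Or.inr ⟨kp, by simp, by rw [h, hb], hm⟩
          · exact Or.inr ⟨kp', by simp [hkp'], h1, h2⟩
        · intro kp' hkp' hm'
          rcases List.mem_cons.mp hkp' with h | h
          · subst h; exact hb ▸ ih3
          · exact ih2 kp' h hm'
        · have : pvStep cs i b kp ≤ b := by rw [hb]; omega
          exact le_trans ih3 this
      · have hb : pvStep cs i b kp = b := by simp [pvStep]; intro h; omega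
        rw [hb] at ih1 ih2 ih3 ⊢
        refine ⟨?_, ?_, ih3⟩
        · rcases ih1 with h | ⟨kp', hkp', h1, h2⟩
          · exact Or.inl h
          · exact Or.inr ⟨kp', by simp [hkp'], h1, h2⟩
        · intro kp' hkp' hm'
          rcases List.mem_cons.mp hkp' with h | h
          · subst h; omega
          · exact ih2 kp' h hm'
    · have hb : pvStep cs i b kp = b := by simp [pvStep, hm]
      rw [hb] at ih1 ih2 ih3 ⊢
      refine ⟨?_, ?_, ih3⟩
      · rcases ih1 with h | ⟨kp', hkp', h1, h2⟩
        · exact Or.inl h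
        · exact Or.inr ⟨kp', by simp [hkp'], h1, h2⟩
      · intro kp' hkp' hm'
        rcases List.mem_cons.mp hkp' with h | h
        · subst h; exact absurd hm' hm
        · exact ih2 kp' h hm'

lemma pv_outer (cs : List Char) (L : List Nat) (b : Nat) :
    (L.foldl (fun b i => pvKw.foldl (pvStep cs i) b) b = b ∨
      ∃ kp ∈ pvKw, ∃ i ∈ L, kp.2 = L.foldl (fun b i => pvKw.foldl (pvStep cs i) b) b ∧
        kp.1.toList.isPrefixOf (cs.drop i) = true)
    ∧ (∀ kp ∈ pvKw, ∀ i ∈ L, kp.1.toList.isPrefixOf (cs.drop i) = true →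
        L.foldl (fun b i => pvKw.foldl (pvStep cs i) b) b ≤ kp.2)
    ∧ L.foldl (fun b i => pvKw.foldl (pvStep cs i) b) b ≤ b := by
  induction L generalizing b with
  | nil => simp
  | cons i L ih =>
    obtain ⟨in1, in2, in3⟩ := pv_inner cs i pvKw b
    obtain ⟨ih1, ih2, ih3⟩ := ih (pvKw.foldl (pvStep cs i) b)
    simp only [List.foldl_cons]
    refine ⟨?_, ?_, le_trans ih3 in3⟩
    · rcases ih1 with h | ⟨kp', hkp', i', hi', h1, h2⟩
      · rw [h]
        rcases in1 with h' | ⟨kp', hkp', h1, h2⟩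
        · exact Or.inl h'
        · exact Or.inr ⟨kp', hkp', i, by simp, h1, h2⟩
      · exact Or.inr ⟨kp', hkp', i', by simp [hi'], h1, h2⟩
    · intro kp' hkp' i' hi' hm'
      rcases List.mem_cons.mp hi' with h | h
      · subst h; exact le_trans ih3 (in2 kp' hkp' hm')
      · exact ih2 kp' hkp' i' h hm'

lemma pv_best_le (s : String) : pvBest s ≤ 5 := by
  have := (pv_outer s.toList (List.range s.toList.length) (pvTypes.length - 1)).2.2
  simpa [pvBest, pvTypes] using this

lemma pv_matched (s : String) (kp : String × Nat) (hmem : kp ∈ pvKw)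
    (i : Nat) (hit : kp.1.toList.isPrefixOf (s.toList.drop i) = true) :
    pvCondP s kp.2 = true := by
  have hIn := pv_isIn_of_hit s kp.1 i hit
  fin_cases hmem <;> simp_all [pvCondP]

lemma pv_best_cases (s : String) : pvBest s = 5 ∨ pvCondP s (pvBest s) = true := by
  have h := (pv_outer s.toList (List.range s.toList.length) (pvTypes.length - 1)).1
  have h5 : pvTypes.length - 1 = 5 := by simp [pvTypes]
  rw [h5] at h
  rcases h with h | ⟨kp, hkp, i, _, h1, h2⟩
  · exact Or.inl (by simpa [pvBest, pvTypes] using h)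
  · right
    have : pvCondP s kp.2 = true := pv_matched s kp hkp i h2
    have he : kp.2 = pvBest s := by simpa [pvBest, pvTypes] using h1
    rwa [he] at this

lemma pv_le_of_mem (s w : String) (p : Nat) (hmem : (w, p) ∈ pvKw) (hw : w.toList ≠ [])
    (hIn : PySem.Str.isIn w s = true) : pvBest s ≤ p := by
  obtain ⟨i, hi, hpre⟩ := pv_hit_of_isIn s w hw hIn
  have := (pv_outer s.toList (List.range s.toList.length) (pvTypes.length - 1)).2.1
    (w, p) hmem i hi hpre
  simpa [pvBest] using this

lemma pv_le_cond (s : String) (p : Nat) (h : pvCondP s p = true) : pvBest s ≤ p := by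
  match p with
  | 0 =>
    simp only [pvCondP, List.any_eq_true] at h
    obtain ⟨w, hw, hIn⟩ := h
    fin_cases hw
    · exact pv_le_of_mem s "latency" 0 (by decide) (by decide) hIn
    · exact pv_le_of_mem s "delay" 0 (by decide) (by decide) hIn
    · exact pv_le_of_mem s "response_time" 0 (by decide) (by decide) hIn
    · exact pv_le_of_mem s "rt" 0 (by decide) (by decide) hIn
  | 1 =>
    simp only [pvCondP, List.any_eq_true] at h
    obtain ⟨w, hw, hIn⟩ := h
    fin_cases hw
    · exact pv_le_of_mem s "throughput" 1 (by decide) (by decide) hIn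
    · exact pv_le_of_mem s "tps" 1 (by decide) (by decide) hIn
    · exact pv_le_of_mem s "qps" 1 (by decide) (by decide) hIn
    · exact pv_le_of_mem s "requests_per_second" 1 (by decide) (by decide) hIn
  | 2 =>
    simp only [pvCondP, List.any_eq_true] at h
    obtain ⟨w, hw, hIn⟩ := h
    fin_cases hw
    · exact pv_le_of_mem s "accuracy" 2 (by decide) (by decide) hIn
    · exact pv_le_of_mem s "precision" 2 (by decide) (by decide) hIn
    · exact pv_le_of_mem s "recall" 2 (by decide) (by decide) hIn
    · exact pv_le_of_mem s "f1" 2 (by decide) (by decide) hIn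
  | 3 =>
    simp only [pvCondP, List.any_eq_true] at h
    obtain ⟨w, hw, hIn⟩ := h
    fin_cases hw
    · exact pv_le_of_mem s "memory" 3 (by decide) (by decide) hIn
    · exact pv_le_of_mem s "ram" 3 (by decide) (by decide) hIn
    · exact pv_le_of_mem s "heap" 3 (by decide) (by decide) hIn
  | 4 =>
    simp only [pvCondP, List.any_eq_true] at h
    obtain ⟨w, hw, hIn⟩ := h
    fin_cases hw
    · exact pv_le_of_mem s "cpu" 4 (by decide) (by decide) hIn
    · exact pv_le_of_mem s "processor" 4 (by decide) (by decide) hIn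
    · exact pv_le_of_mem s "load" 4 (by decide) (by decide) hIn
  | n + 5 => simp [pvCondP] at h

lemma pv_alt_eq (s : String) :
    guess_metric_type_py_alt s = pvTypes.getD (pvBest (PySem.Str.lower s)) "" := rfl

-- ===== VERDICT (by name: the statement is the Claim_ definition above) =====
set_option maxHeartbeats 2000000 in
theorem guess_metric_type_py_spec : Claim_equal_guess_metric_type_py := by
  intro metric_id _
  unfold Spec_guess_metric_type_py
  rw [pv_alt_eq]
  set s := PySem.Str.lower metric_id with hs
  have hle := pv_best_le s
  have hcases := pv_best_cases s
  unfold guess_metric_type_py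
  rw [← hs]
  by_cases c0 : pvCondP s 0 = true
  · have h0 : pvBest s ≤ 0 := pv_le_cond s 0 c0
    have hb : pvBest s = 0 := by omega
    simp only [pvCondP] at c0
    rw [if_pos c0, hb]
    rfl
  · by_cases c1 : pvCondP s 1 = true
    · have h1 : pvBest s ≤ 1 := pv_le_cond s 1 c1
      have hb : pvBest s = 1 := by
        rcases hcases with h | h
        · omega
        · have e0 : pvBest s ≠ 0 := fun e => c0 (by rwa [e] at h)
          omega
      simp only [pvCondP] at c0 c1
      rw [if_neg c0, if_pos c1, hb]
      rfl
    · by_cases c2 : pvCondP s 2 = true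
      · have h2 : pvBest s ≤ 2 := pv_le_cond s 2 c2
        have hb : pvBest s = 2 := by
          rcases hcases with h | h
          · omega
          · have e0 : pvBest s ≠ 0 := fun e => c0 (by rwa [e] at h)
            have e1 : pvBest s ≠ 1 := fun e => c1 (by rwa [e] at h)
            omega
        simp only [pvCondP] at c0 c1 c2
        rw [if_neg c0, if_neg c1, if_pos c2, hb]
        rfl
      · by_cases c3 : pvCondP s 3 = true
        · have h3 : pvBest s ≤ 3 := pv_le_cond s 3 c3
          have hb : pvBest s = 3 := by
            rcases hcases with h | h
            · omega
            · have e0 : pvBest s ≠ 0 := fun e => c0 (by rwa [e] at h)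
              have e1 : pvBest s ≠ 1 := fun e => c1 (by rwa [e] at h)
              have e2 : pvBest s ≠ 2 := fun e => c2 (by rwa [e] at h)
              omega
          simp only [pvCondP] at c0 c1 c2 c3
          rw [if_neg c0, if_neg c1, if_neg c2, if_pos c3, hb]
          rfl
        · by_cases c4 : pvCondP s 4 = true
          · have h4 : pvBest s ≤ 4 := pv_le_cond s 4 c4
            have hb : pvBest s = 4 := by
              rcases hcases with h | h
              · omega
              · have e0 : pvBest s ≠ 0 := fun e => c0 (by rwa [e] at h)
                have e1 : pvBest s ≠ 1 := fun e => c1 (by rwa [e] at h)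
                have e2 : pvBest s ≠ 2 := fun e => c2 (by rwa [e] at h)
                have e3 : pvBest s ≠ 3 := fun e => c3 (by rwa [e] at h)
                omega
            simp only [pvCondP] at c0 c1 c2 c3 c4
            rw [if_neg c0, if_neg c1, if_neg c2, if_neg c3, if_pos c4, hb]
            rfl
          · have hb : pvBest s = 5 := by
              rcases hcases with h | h
              · exact h
              · have e0 : pvBest s ≠ 0 := fun e => c0 (by rwa [e] at h)
                have e1 : pvBest s ≠ 1 := fun e => c1 (by rwa [e] at h)
                have e2 : pvBest s ≠ 2 := fun e => c2 (by rwa [e] at h)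
                have e3 : pvBest s ≠ 3 := fun e => c3 (by rwa [e] at h)
                have e4 : pvBest s ≠ 4 := fun e => c4 (by rwa [e] at h)
                omega
            simp only [pvCondP] at c0 c1 c2 c3 c4
            rw [if_neg c0, if_neg c1, if_neg c2, if_neg c3, if_neg c4, hb]
            rfl
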